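-- pv_equiv track=rewrite | github.com/bdegenkolbe/Wolkenklar | build_github_wiki.py | parse_chapters
-- ===== SOURCE A (Python) =====
-- def parse_chapters(text):
--     """Split document at H2 boundaries into chapters."""
--     lines = text.split('\n')
--     chapters = []
--     current_lines = []
--     current_title = None
--     header_lines = []
--
--     for line in lines:
--         if line.startswith('## ') and not line.startswith('### '):
--             if current_title is not None:
--                 chapters.append((current_title, '\n'.join(current_lines)))
--             elif current_lines:
--                 header_lines = current_lines[:]
--             current_title = line
--             current_lines = [line]
--         else:
--             current_lines.append(line)
--
--     if current_title is not None:
--         chapters.append((current_title, '\n'.join(current_lines)))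
--
--     return header_lines, chapters
-- ===== SOURCE B (Python) =====
-- def _is_h2(line):
--     return line.startswith('## ') and not line.startswith('### ')
--
-- def parse_chapters(text):
--     """Split document at H2 boundaries into chapters."""
--     lines = text.split('\n')
--     n = len(lines)
--     i = 0
--     while i < n and not _is_h2(lines[i]):
--         i += 1
--     if i == n:
--         return [], []
--     header_lines = lines[:i]
--     chapters = []
--     while i < n:
--         j = i + 1
--         while j < n and not _is_h2(lines[j]):
--             j += 1
--         chapters.append((lines[i], '\n'.join(lines[i:j])))
--         i = j
--     return header_lines, chapters
-- ===== Notes on version B (the rewrite author's own statement) =====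
-- stated objective: alternative
-- what changed: Replaces A's single-pass stateful accumulator (current_title/current_lines/header_lines with a post-loop flush) by an index-and-slice formulation: scan for the first H2 header, take the preamble as a slice, then repeatedly scan to the next header and emit each chapter as a slice of the line list.
import Mathlib
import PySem

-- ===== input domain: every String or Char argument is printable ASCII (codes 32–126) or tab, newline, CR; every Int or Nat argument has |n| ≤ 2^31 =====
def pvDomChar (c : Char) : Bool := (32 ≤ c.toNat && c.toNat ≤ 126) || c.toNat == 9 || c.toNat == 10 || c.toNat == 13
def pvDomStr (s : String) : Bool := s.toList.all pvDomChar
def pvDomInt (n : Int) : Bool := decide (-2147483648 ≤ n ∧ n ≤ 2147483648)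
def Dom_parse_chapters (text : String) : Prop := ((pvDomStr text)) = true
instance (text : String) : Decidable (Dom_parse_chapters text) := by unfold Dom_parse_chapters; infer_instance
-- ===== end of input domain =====

-- B replaces A's single-pass stateful accumulator by an index-and-slice formulation
-- (find header positions, emit each chapter as a slice); objective: alternative.

-- ===== PORT A =====
def parse_chapters (text : String) : List String × (List (String × String)) :=
  let lines := (PySem.Str.split? text "\n").getD []  -- sep "\n" is non-empty, split? is always some
  let st := lines.foldl
    (fun (st : List (String × String) × List String × Option String × List String) line =>
      let (chapters, current_lines, current_title, header_lines) := st
      if PySem.Str.startswith line "## " && !(PySem.Str.startswith line "### ") then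
        match current_title with
        | some t =>
            (chapters ++ [(t, PySem.Str.join "\n" current_lines)], [line], some line, header_lines)
        | none =>
            (chapters, [line], some line,
             if current_lines.isEmpty then header_lines else current_lines)
      else (chapters, current_lines ++ [line], current_title, header_lines))
    ([], [], none, [])
  match st with
  | (chapters, current_lines, current_title, header_lines) =>
    match current_title with
    | some t => (header_lines, chapters ++ [(t, PySem.Str.join "\n" current_lines)])
    | none => (header_lines, chapters)

-- ===== PORT B =====
def pvIsH2 (line : String) : Bool :=
  PySem.Str.startswith line "## " && !(PySem.Str.startswith line "### ")

-- outer while loop of B: lines starts with a header; scan to the next header (takeWhile /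
-- dropWhile = the inner while plus the slices lines[i:j], lines[j:]) and emit the chapter
def pvChaptersB : List String → List (String × String)
  | [] => []
  | l :: ls =>
    let pre := ls.takeWhile (fun x => !pvIsH2 x)
    let rest := ls.dropWhile (fun x => !pvIsH2 x)
    (l, PySem.Str.join "\n" (l :: pre)) :: pvChaptersB rest
termination_by ls => ls.length
decreasing_by
  simpa using Nat.lt_succ_of_le (List.length_dropWhile_le (fun x => !pvIsH2 x) ls)

def parse_chapters_alt (text : String) : List String × (List (String × String)) :=
  let lines := (PySem.Str.split? text "\n").getD []  -- sep "\n" is non-empty, split? is always some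
  let header_lines := lines.takeWhile (fun x => !pvIsH2 x)
  let rest := lines.dropWhile (fun x => !pvIsH2 x)
  if rest.isEmpty then ([], []) else (header_lines, pvChaptersB rest)

-- ===== PRECONDITION & SPEC =====
def Spec_parse_chapters (text : String) (out : List String × (List (String × String))) : Prop := out = parse_chapters_alt text
instance (text : String) (out : List String × (List (String × String))) : Decidable (Spec_parse_chapters text out) := by unfold Spec_parse_chapters; infer_instance

-- ===== CLAIM (what is proved, stated in full; the proofs are below) =====
def Claim_equal_parse_chapters : Prop := ∀ (text : String), Dom_parse_chapters text → Spec_parse_chapters text (parse_chapters text)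

-- ===== LEMMAS AND PROOFS =====

-- abbreviations for the proof
def pvStep (st : List (String × String) × List String × Option String × List String)
    (line : String) : List (String × String) × List String × Option String × List String :=
  let (chapters, current_lines, current_title, header_lines) := st
  if PySem.Str.startswith line "## " && !(PySem.Str.startswith line "### ") then
    match current_title with
    | some t =>
        (chapters ++ [(t, PySem.Str.join "\n" current_lines)], [line], some line, header_lines)
    | none =>
        (chapters, [line], some line,
         if current_lines.isEmpty then header_lines else current_lines)
  else (chapters, current_lines ++ [line], current_title, header_lines)

def pvFinish (st : List (String × String) × List String × Option String × List String) :
    List String × (List (String × String)) :=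
  match st with
  | (chapters, current_lines, current_title, header_lines) =>
    match current_title with
    | some t => (header_lines, chapters ++ [(t, PySem.Str.join "\n" current_lines)])
    | none => (header_lines, chapters)

theorem pvChaptersB_cons (l : String) (ls : List String) :
    pvChaptersB (l :: ls) =
      (l, PySem.Str.join "\n" (l :: ls.takeWhile (fun x => !pvIsH2 x))) ::
        pvChaptersB (ls.dropWhile (fun x => !pvIsH2 x)) := by
  rw [pvChaptersB]

theorem pvSome_phase (lines : List String) :
    ∀ (ch : List (String × String)) (cur hdr : List String) (t : String),
      pvFinish (lines.foldl pvStep (ch, cur, some t, hdr)) =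
        (hdr, ch ++ (t, PySem.Str.join "\n" (cur ++ lines.takeWhile (fun x => !pvIsH2 x))) ::
          pvChaptersB (lines.dropWhile (fun x => !pvIsH2 x))) := by
  induction lines with
  | nil => intro ch cur hdr t; simp [pvFinish, pvChaptersB]
  | cons l ls ih =>
    intro ch cur hdr t
    by_cases h : pvIsH2 l = true
    · have hstep : pvStep (ch, cur, some t, hdr) l =
          (ch ++ [(t, PySem.Str.join "\n" cur)], [l], some l, hdr) := by
        simp only [pvStep, pvIsH2] at h ⊢; rw [h]; rfl
      rw [List.foldl_cons, hstep, ih]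
      simp [List.takeWhile, List.dropWhile, h, pvChaptersB_cons]
    · have h' : pvIsH2 l = false := by simpa using h
      have hstep : pvStep (ch, cur, some t, hdr) l = (ch, cur ++ [l], some t, hdr) := by
        simp only [pvStep, pvIsH2] at h' ⊢; rw [h']; rfl
      rw [List.foldl_cons, hstep, ih]
      simp [List.takeWhile, List.dropWhile, h']

theorem pvNone_phase (lines : List String) :
    ∀ (cur : List String),
      pvFinish (lines.foldl pvStep ([], cur, none, [])) =
        (match lines.dropWhile (fun x => !pvIsH2 x) with
         | [] => ([], [])
         | r => (cur ++ lines.takeWhile (fun x => !pvIsH2 x), pvChaptersB r)) := by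
  induction lines with
  | nil => intro cur; simp [pvFinish]
  | cons l ls ih =>
    intro cur
    by_cases h : pvIsH2 l = true
    · have hstep : pvStep ([], cur, none, []) l =
          ([], [l], some l, if cur.isEmpty then [] else cur) := by
        simp only [pvStep, pvIsH2] at h ⊢; rw [h]; rfl
      have hhdr : (if cur.isEmpty then ([] : List String) else cur) = cur := by
        cases cur <;> simp
      rw [List.foldl_cons, hstep, hhdr, pvSome_phase]
      simp [List.takeWhile, List.dropWhile, h, pvChaptersB_cons]
    · have h' : pvIsH2 l = false := by simpa using h
      have hstep : pvStep ([], cur, none, []) l = ([], cur ++ [l], none, []) := by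
        simp only [pvStep, pvIsH2] at h' ⊢; rw [h']; rfl
      rw [List.foldl_cons, hstep, ih]
      simp [List.takeWhile, List.dropWhile, h']

-- ===== VERDICT (by name: the statement is the Claim_ definition above) =====
theorem parse_chapters_spec : Claim_equal_parse_chapters := by
  intro text _
  unfold Spec_parse_chapters parse_chapters parse_chapters_alt
  show pvFinish (((PySem.Str.split? text "\n").getD []).foldl pvStep ([], [], none, [])) = _
  rw [pvNone_phase]
  generalize (PySem.Str.split? text "\n").getD [] = lines
  cases hr : lines.dropWhile (fun x => !pvIsH2 x) with
  | nil => simp [hr]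
  | cons h t => simp [hr]
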